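-- pv_equiv track=rewrite | github.com/yeseoLee/algorithm-study | CodeForces/220511 div4/E.py | get_count_to_eat
-- ===== SOURCE A (Python) =====
-- def get_count_to_eat(sugar,query):
--     counts=[]
--     for q in query:
--         count=0
--         for s in sugar:
--             count+=1
--             q-=s
--             if q<=0:
--                 counts.append(count)
--                 break
--         else:
--             counts.append(-1)
--     return counts
-- ===== SOURCE B (Python) =====
-- def get_count_to_eat(sugar, query):
--     # Precompute strict prefix-maximum records (value, 1-based index).
--     # The answer for q is the index of the first prefix sum >= q, which is
--     # always a strict record, so a binary search over records suffices.
--     recs = []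
--     total = 0
--     last = None
--     for i, s in enumerate(sugar):
--         total += s
--         if last is None or total > last:
--             recs.append((total, i + 1))
--             last = total
--     res = []
--     for q in query:
--         lo, hi = 0, len(recs)
--         while lo < hi:
--             mid = (lo + hi) // 2
--             if recs[mid][0] < q:
--                 lo = mid + 1
--             else:
--                 hi = mid
--         res.append(recs[lo][1] if lo < len(recs) else -1)
--     return res
-- ===== Notes on version B (the rewrite author's own statement) =====
-- stated objective: faster
-- what changed: Replaces the per-query rescan of the sugar list by a one-pass precomputation of strict prefix-maximum records followed by a binary search per query.
import Mathlib
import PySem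

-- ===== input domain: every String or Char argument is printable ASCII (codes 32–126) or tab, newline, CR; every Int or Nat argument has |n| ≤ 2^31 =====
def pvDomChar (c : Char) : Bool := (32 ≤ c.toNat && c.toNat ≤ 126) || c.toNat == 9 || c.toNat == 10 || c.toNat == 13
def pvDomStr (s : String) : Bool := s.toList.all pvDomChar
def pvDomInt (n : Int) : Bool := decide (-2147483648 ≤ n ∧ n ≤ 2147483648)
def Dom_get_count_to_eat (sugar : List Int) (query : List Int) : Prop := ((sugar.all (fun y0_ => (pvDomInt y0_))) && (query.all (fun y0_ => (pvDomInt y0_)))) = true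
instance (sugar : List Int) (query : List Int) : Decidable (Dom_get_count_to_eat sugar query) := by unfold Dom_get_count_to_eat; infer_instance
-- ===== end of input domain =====

-- B precomputes strict prefix-maximum records once and answers each query by
-- binary search over them; A rescans the whole sugar list for every query.

-- ===== PORT A =====
-- inner `for s in sugar` loop of A: count/q updated in place, break on q ≤ 0, else -1
def pvEatOne (sugar : List Int) (q : Int) (count : Int) : Int :=
  match sugar with
  | [] => -1
  | s :: rest =>
    let count := count + 1
    let q := q - s
    if q ≤ 0 then count else pvEatOne rest q count

def get_count_to_eat (sugar : List Int) (query : List Int) : List Int :=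
  query.foldl (fun counts q => counts ++ [pvEatOne sugar q 0]) []

-- ===== PORT B =====
-- the `for i, s in enumerate(sugar)` loop of Source B: builds (value, 1-based index) records
def pvBuildRecs (sugar : List Int) (total : Int) (i : Int) (last : Option Int) : List (Int × Int) :=
  match sugar with
  | [] => []
  | s :: rest =>
    let total := total + s
    if (match last with | none => true | some m => decide (m < total)) then
      (total, i + 1) :: pvBuildRecs rest total (i + 1) (some total)
    else
      pvBuildRecs rest total (i + 1) last

-- the `while lo < hi` bisect loop of Source B; fuel (= initial hi - lo) only makes the
-- same computation total, it never changes the value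
def pvBisectFuel (recs : List (Int × Int)) (q : Int) : Nat → Nat → Nat → Nat
  | 0, lo, _ => lo
  | fuel + 1, lo, hi =>
    if lo < hi then
      -- mid = (lo + hi) // 2, inlined
      if (recs.getD ((lo + hi) / 2) (0, 0)).1 < q then pvBisectFuel recs q fuel ((lo + hi) / 2 + 1) hi
      else pvBisectFuel recs q fuel lo ((lo + hi) / 2)
    else lo

def pvBisect (recs : List (Int × Int)) (q : Int) (lo hi : Nat) : Nat :=
  pvBisectFuel recs q (hi - lo) lo hi

def pvAnswer (recs : List (Int × Int)) (q : Int) : Int :=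
  -- lo = the final value of the while loop, inlined
  if pvBisect recs q 0 recs.length < recs.length then
    (recs.getD (pvBisect recs q 0 recs.length) (0, 0)).2
  else -1

def get_count_to_eat_alt (sugar : List Int) (query : List Int) : List Int :=
  let recs := pvBuildRecs sugar 0 0 none
  query.foldl (fun res q => res ++ [pvAnswer recs q]) []

-- ===== PRECONDITION & SPEC =====
def Spec_get_count_to_eat (sugar : List Int) (query : List Int) (out : List Int) : Prop := out = get_count_to_eat_alt sugar query
instance (sugar : List Int) (query : List Int) (out : List Int) : Decidable (Spec_get_count_to_eat sugar query out) := by unfold Spec_get_count_to_eat; infer_instance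

-- ===== CLAIM (what is proved, stated in full; the proofs are below) =====
def Claim_equal_get_count_to_eat : Prop := ∀ (sugar : List Int) (query : List Int), Dom_get_count_to_eat sugar query → Spec_get_count_to_eat sugar query (get_count_to_eat sugar query)

-- ===== LEMMAS AND PROOFS =====

-- prefix sums of sugar starting from running total t
def pvPrefixes (sugar : List Int) (t : Int) : List Int :=
  match sugar with
  | [] => []
  | s :: rest => (t + s) :: pvPrefixes rest (t + s)

-- linear search for the first prefix ≥ q, counter c is the number already consumed
def pvFirstGe (ps : List Int) (q : Int) (c : Int) : Int :=
  match ps with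
  | [] => -1
  | p :: rest => if q ≤ p then c + 1 else pvFirstGe rest q (c + 1)

-- linear search over records
def pvRecFirst (recs : List (Int × Int)) (q : Int) : Int :=
  match recs with
  | [] => -1
  | (v, i) :: rest => if q ≤ v then i else pvRecFirst rest q

theorem pvEatOne_eq_firstGe (sugar : List Int) (q t c : Int) :
    pvEatOne sugar q c = pvFirstGe (pvPrefixes sugar t) (q + t) c := by
  induction sugar generalizing q t c with
  | nil => rfl
  | cons s rest ih =>
    simp only [pvEatOne, pvPrefixes, pvFirstGe]
    by_cases h : q - s ≤ 0
    · rw [if_pos h, if_pos (by omega : q + t ≤ t + s)]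
    · rw [if_neg h, if_neg (by omega : ¬ q + t ≤ t + s)]
      have := ih (q - s) (t + s) (c + 1)
      simpa [show q - s + (t + s) = q + t by ring] using this

theorem pvRecFirst_eq_firstGe (sugar : List Int) (t i q : Int) (last : Option Int)
    (hlast : ∀ m, last = some m → m < q) :
    pvRecFirst (pvBuildRecs sugar t i last) q = pvFirstGe (pvPrefixes sugar t) q i := by
  induction sugar generalizing t i last with
  | nil => rfl
  | cons s rest ih =>
    simp only [pvBuildRecs, pvPrefixes, pvFirstGe]
    match hl : last with
    | none =>
      simp only [if_true, pvRecFirst]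
      by_cases hq : q ≤ t + s
      · rw [if_pos hq, if_pos hq]
      · rw [if_neg hq, if_neg hq]
        exact ih (t + s) (i + 1) (some (t + s)) (by intro m hm; cases hm; omega)
    | some m =>
      have hmq : m < q := hlast m rfl
      by_cases hrec : m < t + s
      · rw [if_pos (by simpa using hrec)]
        simp only [pvRecFirst]
        by_cases hq : q ≤ t + s
        · rw [if_pos hq, if_pos hq]
        · rw [if_neg hq, if_neg hq]
          exact ih (t + s) (i + 1) (some (t + s)) (by intro m' hm'; cases hm'; omega)
      · rw [if_neg (by simpa using hrec)]
        rw [if_neg (by omega : ¬ q ≤ t + s)]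
        exact ih (t + s) (i + 1) (some m) (by intro m' hm'; cases hm'; omega)

-- every record built with last = some m has value > m
theorem pvBuildRecs_mem_gt (sugar : List Int) (t i : Int) (m : Int) (r : Int × Int)
    (hr : r ∈ pvBuildRecs sugar t i (some m)) : m < r.1 := by
  induction sugar generalizing t i m with
  | nil => simp [pvBuildRecs] at hr
  | cons s rest ih =>
    simp only [pvBuildRecs] at hr
    by_cases hrec : m < t + s
    · rw [if_pos (by simpa using hrec)] at hr
      rcases List.mem_cons.mp hr with h | h
      · subst h; simpa using hrec
      · have := ih (t + s) (i + 1) (t + s) h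
        omega
    · rw [if_neg (by simpa using hrec)] at hr
      exact ih (t + s) (i + 1) m hr

theorem pvBuildRecs_sorted (sugar : List Int) (t i : Int) (last : Option Int) :
    (pvBuildRecs sugar t i last).Pairwise (fun a b => a.1 < b.1) := by
  induction sugar generalizing t i last with
  | nil => simp [pvBuildRecs]
  | cons s rest ih =>
    simp only [pvBuildRecs]
    by_cases hrec : (match last with | none => true | some m => decide (m < t + s)) = true
    · rw [if_pos hrec]
      refine List.pairwise_cons.mpr ⟨?_, ih (t + s) (i + 1) (some (t + s))⟩
      intro r hr
      exact pvBuildRecs_mem_gt rest (t + s) (i + 1) (t + s) r hr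
    · rw [if_neg hrec]; exact ih (t + s) (i + 1) last

-- binary search: classifies every index as < q (left of result) or ≥ q (right of it)
theorem pvBisectFuel_char (recs : List (Int × Int)) (q : Int)
    (hs : recs.Pairwise (fun a b => a.1 < b.1)) :
    ∀ (fuel lo hi : Nat), hi - lo ≤ fuel → hi ≤ recs.length → lo ≤ hi →
    (∀ j, j < lo → (hj : j < recs.length) → recs[j].1 < q) →
    (∀ j, hi ≤ j → (hj : j < recs.length) → q ≤ recs[j].1) →
    pvBisectFuel recs q fuel lo hi ≤ recs.length ∧
      ∀ j, (hj : j < recs.length) →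
        (if j < pvBisectFuel recs q fuel lo hi then recs[j].1 < q else q ≤ recs[j].1) := by
  have hmono : ∀ (a b : Nat) (ha : a < recs.length) (hb : b < recs.length),
      a < b → recs[a].1 < recs[b].1 := by
    intro a b ha hb hab
    exact (List.pairwise_iff_getElem.mp hs) a b ha hb hab
  intro fuel
  induction fuel with
  | zero =>
    intro lo hi hn hhi hlohi hlo hhi2
    have : lo = hi := by omega
    subst this
    simp only [pvBisectFuel]
    refine ⟨by omega, ?_⟩
    intro j hj
    by_cases hjlo : j < lo
    · rw [if_pos hjlo]; exact hlo j hjlo hj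
    · rw [if_neg hjlo]; exact hhi2 j (by omega) hj
  | succ fuel ihn =>
    intro lo hi hn hhi hlohi hlo hhi2
    simp only [pvBisectFuel]
    by_cases h : lo < hi
    · have hmid1 : (lo + hi) / 2 < hi := by omega
      have hmid2 : lo ≤ (lo + hi) / 2 := by omega
      have hmidlen : (lo + hi) / 2 < recs.length := by omega
      simp only [if_pos h, List.getD_eq_getElem recs (0, 0) hmidlen]
      by_cases hv : recs[(lo + hi) / 2].1 < q
      · simp only [if_pos hv]
        refine ihn _ _ (by omega) hhi (by omega) ?_ hhi2
        intro j hj hjlen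
        rcases Nat.lt_or_ge j ((lo + hi) / 2) with hj' | hj'
        · exact lt_trans (hmono j _ hjlen hmidlen hj') hv
        · have : j = (lo + hi) / 2 := by omega
          subst this; exact hv
      · simp only [if_neg hv]
        refine ihn _ _ (by omega) (by omega) (by omega) hlo ?_
        intro j hj hjlen
        rcases Nat.lt_or_ge ((lo + hi) / 2) j with hj' | hj'
        · exact le_of_lt (lt_of_le_of_lt (le_of_not_gt hv) (hmono _ j hmidlen hjlen hj'))
        · have : j = (lo + hi) / 2 := by omega
          subst this; exact le_of_not_gt hv
    · simp only [if_neg h]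
      have : lo = hi := by omega
      refine ⟨by omega, ?_⟩
      intro j hj
      by_cases hjlo : j < lo
      · rw [if_pos hjlo]; exact hlo j hjlo hj
      · rw [if_neg hjlo]; exact hhi2 j (by omega) hj

-- linear search over records, characterized by the same classification
theorem pvRecFirst_char (recs : List (Int × Int)) (q : Int) (r : Nat)
    (hr : r ≤ recs.length)
    (h : ∀ j, (hj : j < recs.length) → (if j < r then recs[j].1 < q else q ≤ recs[j].1)) :
    pvRecFirst recs q = (if r < recs.length then (recs.getD r (0, 0)).2 else -1) := by
  induction recs generalizing r with
  | nil => simp [pvRecFirst]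
  | cons p rest ih =>
    obtain ⟨v, i⟩ := p
    match r with
    | 0 =>
      have h0 : q ≤ v := by simpa using h 0 (by simp)
      simp only [pvRecFirst, if_pos h0]
      simp
    | r' + 1 =>
      have h0 : v < q := by simpa using h 0 (by simp)
      simp only [pvRecFirst, if_neg (by omega : ¬ q ≤ v)]
      have := ih r' (by simpa using hr) (fun j hj => by
        have := h (j + 1) (by simpa using Nat.succ_lt_succ hj)
        simpa using this)
      rw [this]
      simp

theorem pvAnswer_eq_recFirst (recs : List (Int × Int)) (q : Int)
    (hs : recs.Pairwise (fun a b => a.1 < b.1)) :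
    pvAnswer recs q = pvRecFirst recs q := by
  obtain ⟨hle, hcls⟩ := pvBisectFuel_char recs q hs (recs.length - 0) 0 recs.length
    (le_refl _) (le_refl _) (Nat.zero_le _) (by intro j hj _; omega) (by intro j hj hjlen; omega)
  unfold pvAnswer pvBisect
  exact (pvRecFirst_char recs q _ hle hcls).symm

theorem pv_foldl_append {α β : Type} (f : α → β) (l : List α) (acc : List β) :
    l.foldl (fun r q => r ++ [f q]) acc = acc ++ l.map f := by
  induction l generalizing acc with
  | nil => simp
  | cons x xs ih => simp [List.foldl, ih]

-- ===== VERDICT (by name: the statement is the Claim_ definition above) =====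
theorem get_count_to_eat_spec : Claim_equal_get_count_to_eat := by
  intro sugar query _
  unfold Spec_get_count_to_eat get_count_to_eat get_count_to_eat_alt
  rw [pv_foldl_append, pv_foldl_append]
  apply List.map_congr_left
  intro q _
  rw [pvAnswer_eq_recFirst _ _ (pvBuildRecs_sorted sugar 0 0 none),
      pvRecFirst_eq_firstGe sugar 0 0 q none (by intro m h; cases h)]
  simpa using pvEatOne_eq_firstGe sugar q 0 0
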